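-- pv_equiv track=rewrite | github.com/Fabro-f/aws_pipeline | validation.py | _find_similar_cycle_numbers
-- ===== SOURCE A (Python) =====
-- from typing import Dict, Any, List, Tuple, Optional
--
-- def _find_similar_cycle_numbers(cycle_number: int, charges: List[Dict]) -> List[int]:
--     """Find cycle numbers close to the requested one."""
--     cycle_numbers = []
--     for charge in charges:
--         num = charge.get("cycleNumber")
--         if num is not None:
--             try:
--                 cycle_numbers.append(int(num))
--             except:
--                 pass
--
--     if not cycle_numbers:
--         return []
--
--     cycle_numbers = sorted(set(cycle_numbers))
--
--     # Find closest numbers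
--     similar = []
--     for num in cycle_numbers:
--         diff = abs(num - cycle_number)
--         if diff <= 10 and diff > 0:
--             similar.append(num)
--
--     return sorted(similar)[:3]
-- ===== SOURCE B (Python) =====
-- def _find_similar_cycle_numbers(cycle_number, charges):
--     """Find cycle numbers close to the requested one."""
--     seen = set()
--     for charge in charges:
--         num = charge.get("cycleNumber")
--         if num is not None:
--             try:
--                 seen.add(int(num))
--             except:
--                 pass
--
--     similar = []
--     for num in range(cycle_number - 10, cycle_number + 11):
--         if num != cycle_number and num in seen:
--             similar.append(num)
--             if len(similar) == 3:
--                 break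
--     return similar
-- ===== Notes on version B (the rewrite author's own statement) =====
-- stated objective: simpler
-- what changed: Replaces sort-then-filter-then-slice over all collected cycle numbers by a bounded probe: build a set once and scan the 21 integers of the +-10 window in ascending order, collecting members (skipping cycle_number itself) and stopping after three.
import Mathlib
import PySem

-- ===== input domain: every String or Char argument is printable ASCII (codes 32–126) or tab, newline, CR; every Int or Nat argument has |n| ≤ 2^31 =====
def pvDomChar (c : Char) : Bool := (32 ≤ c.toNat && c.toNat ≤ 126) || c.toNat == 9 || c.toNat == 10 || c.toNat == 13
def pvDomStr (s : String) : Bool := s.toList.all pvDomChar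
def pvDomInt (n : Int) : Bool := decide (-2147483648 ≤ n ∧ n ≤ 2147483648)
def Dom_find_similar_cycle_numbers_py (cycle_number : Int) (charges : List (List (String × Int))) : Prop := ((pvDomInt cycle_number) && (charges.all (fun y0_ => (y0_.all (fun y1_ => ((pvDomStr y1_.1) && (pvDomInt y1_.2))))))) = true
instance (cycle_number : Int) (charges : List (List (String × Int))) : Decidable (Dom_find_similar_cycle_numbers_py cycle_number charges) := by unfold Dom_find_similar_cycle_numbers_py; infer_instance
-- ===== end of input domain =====

-- B replaces A's sort-filter-slice over all collected numbers by a set probe over the 21-integer ±10 window (stop after three); simpler, same results.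


-- ===== PORT A =====
-- the dict values are Int, so `num is not None` is key presence and `int(num)` is the identity (never raises)
def find_similar_cycle_numbers_py (cycle_number : Int) (charges : List (List (String × Int))) : List Int :=
  let cycle_numbers : List Int := charges.foldl (fun acc charge =>
    match PySem.Dict.get? (PySem.Dict.mk charge) "cycleNumber" with
    | some num => acc ++ [num]
    | none => acc) []
  if cycle_numbers = [] then []
  else
    let sortedNums := PySem.List.sorted (PySem.Set.ofList cycle_numbers) (fun x => x) false
    let similar := sortedNums.foldl (fun acc num =>
      if |num - cycle_number| ≤ 10 ∧ |num - cycle_number| > 0 then acc ++ [num] else acc) []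
    (PySem.List.sorted similar (fun x => x) false).take 3

-- ===== PORT B =====
-- the window scan: append members of `seen`, skip cycle_number, break after 3
def pvScanWindow (c : Int) (seen : PySem.Set Int) : List Int → List Int → List Int
  | [], acc => acc
  | n :: rest, acc =>
    if n ≠ c ∧ PySem.Set.contains seen n then
      let acc' := acc ++ [n]
      if acc'.length = 3 then acc' else pvScanWindow c seen rest acc'
    else pvScanWindow c seen rest acc

def find_similar_cycle_numbers_py_alt (cycle_number : Int) (charges : List (List (String × Int))) : List Int :=
  let seen : PySem.Set Int := charges.foldl (fun s charge =>
    match PySem.Dict.get? (PySem.Dict.mk charge) "cycleNumber" with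
    | some num => PySem.Set.add s num
    | none => s) PySem.Set.empty
  pvScanWindow cycle_number seen (PySem.List.pyRange (cycle_number - 10) (cycle_number + 11) 1) []

-- ===== PRECONDITION & SPEC =====
def Spec_find_similar_cycle_numbers_py (cycle_number : Int) (charges : List (List (String × Int))) (out : List Int) : Prop := out = find_similar_cycle_numbers_py_alt cycle_number charges
instance (cycle_number : Int) (charges : List (List (String × Int))) (out : List Int) : Decidable (Spec_find_similar_cycle_numbers_py cycle_number charges out) := by unfold Spec_find_similar_cycle_numbers_py; infer_instance

-- ===== CLAIM (what is proved, stated in full; the proofs are below) =====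
def Claim_equal_find_similar_cycle_numbers_py : Prop := ∀ (cycle_number : Int) (charges : List (List (String × Int))), Dom_find_similar_cycle_numbers_py cycle_number charges → Spec_find_similar_cycle_numbers_py cycle_number charges (find_similar_cycle_numbers_py cycle_number charges)

-- ===== LEMMAS AND PROOFS =====

-- the numbers both programs extract from charges
def pvNums (charges : List (List (String × Int))) : List Int :=
  charges.filterMap (fun charge => PySem.Dict.get? (PySem.Dict.mk charge) "cycleNumber")

theorem pvA_collect (charges : List (List (String × Int))) (acc : List Int) :
    charges.foldl (fun acc charge =>
      match PySem.Dict.get? (PySem.Dict.mk charge) "cycleNumber" with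
      | some num => acc ++ [num]
      | none => acc) acc = acc ++ pvNums charges := by
  induction charges generalizing acc with
  | nil => simp [pvNums]
  | cons ch rest ih =>
    simp only [List.foldl_cons, pvNums, List.filterMap_cons]
    cases PySem.Dict.get? (PySem.Dict.mk ch) "cycleNumber" <;> simp [ih, pvNums]

theorem pvB_collect (charges : List (List (String × Int))) (s : PySem.Set Int) :
    charges.foldl (fun s charge =>
      match PySem.Dict.get? (PySem.Dict.mk charge) "cycleNumber" with
      | some num => PySem.Set.add s num
      | none => s) s = (pvNums charges).foldl PySem.Set.add s := by
  induction charges generalizing s with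
  | nil => simp [pvNums]
  | cons ch rest ih =>
    simp only [List.foldl_cons, pvNums, List.filterMap_cons]
    cases PySem.Dict.get? (PySem.Dict.mk ch) "cycleNumber" <;> simp [ih, pvNums]

theorem pvScanWindow_spec (c : Int) (s : PySem.Set Int) (l : List Int) (acc : List Int)
    (h : acc.length < 3) :
    pvScanWindow c s l acc =
      acc ++ (l.filter (fun n => decide (n ≠ c) && PySem.Set.contains s n)).take (3 - acc.length) := by
  induction l generalizing acc with
  | nil => simp [pvScanWindow]
  | cons n rest ih =>
    simp only [pvScanWindow, List.filter_cons]
    by_cases hc : n ≠ c ∧ PySem.Set.contains s n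
    · simp only [if_pos hc]
      have hk : (decide (n ≠ c) && PySem.Set.contains s n) = true := by
        rw [hc.2]; simp [hc.1]
      rw [hk]
      by_cases h3 : (acc ++ [n]).length = 3
      · simp only [if_pos h3]
        have h1 : 3 - acc.length = 1 := by simp at h3; omega
        simp [h1]
      · simp only [if_neg h3]
        have hlen : (acc ++ [n]).length < 3 := by simp at h3 ⊢; omega
        rw [ih _ hlen]
        have h2 : 3 - acc.length = (3 - (acc ++ [n]).length) + 1 := by simp; omega
        simp [h2, List.take_succ_cons]
    · rw [if_neg hc]
      have hk : (decide (n ≠ c) && PySem.Set.contains s n) = false := by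
        by_cases h1 : n = c <;> simp [h1] at hc ⊢ <;> simp [hc]
      rw [hk, ih _ h]
      simp

theorem find_similar_cycle_numbers_py_spec : Claim_equal_find_similar_cycle_numbers_py := by
  intro c charges _
  unfold Spec_find_similar_cycle_numbers_py find_similar_cycle_numbers_py find_similar_cycle_numbers_py_alt
  simp only [pvA_collect, pvB_collect, List.nil_append, PySem.Set.empty, ← PySem.Set.ofList_eq_foldl]
  rw [pvScanWindow_spec c _ _ [] (by simp)]
  simp only [List.nil_append, List.length_nil, Nat.sub_zero]
  set nums := pvNums charges with hnums
  -- simplify A's inner loop to a filter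
  rw [PySem.List.foldl_append_ite_eq_filter (fun num => |num - c| ≤ 10 ∧ |num - c| > 0)]
  simp only [List.nil_append]
  set sortedNums := PySem.List.sorted (PySem.Set.ofList nums) (fun x => x) false with hsn
  have hpairS : sortedNums.Pairwise (· < ·) := PySem.List.sorted_ofList_pairwise_lt nums
  set similar := sortedNums.filter (fun x => decide (|x - c| ≤ 10 ∧ |x - c| > 0)) with hsim
  have hpairF : similar.Pairwise (· < ·) := hpairS.filter _
  have hsorted : PySem.List.sorted similar (fun x => x) false = similar :=
    PySem.List.sorted_eq_self_of_pairwise similar (fun x => x)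
      (hpairF.imp (fun h => le_of_lt h))
  set windowed := (PySem.List.pyRange (c - 10) (c + 11) 1).filter
      (fun n => decide (n ≠ c) && PySem.Set.contains (PySem.Set.ofList nums) n) with hw
  have hpairW : windowed.Pairwise (· < ·) := (PySem.List.pairwise_lt_pyRange_one _ _).filter _
  have hmem : ∀ a, a ∈ similar ↔ a ∈ windowed := by
    intro a
    simp only [hsim, hw, List.mem_filter, hsn, PySem.List.mem_sorted, PySem.Set.mem_ofList,
      PySem.List.mem_pyRange_one, Bool.and_eq_true, decide_eq_true_eq,
      PySem.Set.contains_iff]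
    constructor
    · rintro ⟨ha, h10, h0⟩
      have hb := abs_le.mp h10
      have hne : a ≠ c := by
        intro h; rw [h, sub_self, abs_zero] at h0; exact lt_irrefl 0 h0
      exact ⟨⟨by omega, by omega⟩, hne, ha⟩
    · rintro ⟨⟨h1, h2⟩, hne, ha⟩
      exact ⟨ha, abs_le.mpr ⟨by omega, by omega⟩,
        abs_pos.mpr (sub_ne_zero.mpr hne)⟩
  have heq : similar = windowed := by
    have hperm : similar.Perm windowed :=
      (List.perm_ext_iff_of_nodup (hpairF.imp (fun h => ne_of_lt h))
        (hpairW.imp (fun h => ne_of_lt h))).mpr hmem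
    exact List.eq_of_perm_of_sorted (fun a b _ _ hab hba => absurd hba (by omega))
      hpairF hpairW hperm
  by_cases hnil : nums = []
  · rw [if_pos hnil]
    have hsimnil : similar = [] := by
      simp [hsim, hsn, hnil]
    rw [← heq, hsimnil]; rfl
  · rw [if_neg hnil, hsorted, heq]

-- ===== VERDICT (by name: the statement is the Claim_ definition above) =====
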